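-- pv_equiv track=rewrite | github.com/kimyoonduk/nyt-puzzle-solver | strands/strands_helpers.py | get_bitmask_list_sorted
-- ===== SOURCE A (Python) =====
-- from collections import defaultdict
--
-- def path_to_bitmask(path, n, m):
--     bitmask = 0
--     for x, y in path:
--         bitmask |= 1 << (x * m + y)
--     return bitmask
--
-- def get_bitmask_list_sorted(path_list, n, m):
--
--     bitmask_path_dict = defaultdict(list)
--     bitmasks = set()
--
--     for path in path_list:
--
--         bitmask = path_to_bitmask(path, n, m)
--         bitmasks.add(bitmask)
--         bitmask_path_dict[bitmask].append(path)
--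
--     bitmask_list = list(bitmasks)
--
--     # sort bitmask_list in ascending order
--     bitmask_list.sort()
--
--     return bitmask_list, bitmask_path_dict
-- ===== SOURCE B (Python) =====
-- from collections import defaultdict
--
-- def path_to_bitmask(path, n, m):
--     bitmask = 0
--     for x, y in path:
--         bitmask |= 1 << (x * m + y)
--     return bitmask
--
-- def get_bitmask_list_sorted(path_list, n, m):
--     # one mapping pass, then ordered dedup + per-key gather (no incremental dict/set loop)
--     masks = [path_to_bitmask(p, n, m) for p in path_list]
--     order = list(dict.fromkeys(masks))
--     grouping = defaultdict(list)
--     grouping.update(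
--         (k, [p for mk, p in zip(masks, path_list) if mk == k]) for k in order
--     )
--     return sorted(order), grouping
-- ===== Notes on version B (the rewrite author's own statement) =====
-- stated objective: alternative
-- what changed: Instead of one loop incrementally maintaining a set and a defaultdict, B maps every path to its bitmask once, deduplicates the mask list in first-seen order via dict.fromkeys, and builds each group by filtering the zipped (mask, path) pairs per unique key; the sorted list is sorted() of the deduped keys.
import Mathlib
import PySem

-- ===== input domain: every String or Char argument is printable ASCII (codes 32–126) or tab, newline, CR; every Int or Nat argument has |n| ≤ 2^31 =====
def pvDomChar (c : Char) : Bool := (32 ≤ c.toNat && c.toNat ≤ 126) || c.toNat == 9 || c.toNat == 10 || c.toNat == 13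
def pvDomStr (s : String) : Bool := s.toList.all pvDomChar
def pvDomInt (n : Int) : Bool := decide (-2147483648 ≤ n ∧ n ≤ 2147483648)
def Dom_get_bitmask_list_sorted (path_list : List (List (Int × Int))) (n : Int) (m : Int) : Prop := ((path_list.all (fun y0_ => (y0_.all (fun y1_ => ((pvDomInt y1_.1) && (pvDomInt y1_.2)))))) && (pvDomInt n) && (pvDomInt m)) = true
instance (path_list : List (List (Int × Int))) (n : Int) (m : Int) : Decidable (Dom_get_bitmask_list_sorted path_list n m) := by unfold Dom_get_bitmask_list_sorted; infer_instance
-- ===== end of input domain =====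

-- B replaces A's incremental set+defaultdict loop by a map / ordered-dedup / per-key-gather decomposition (objective: alternative).

-- ===== PORT A =====
-- module helper path_to_bitmask, shared by both Pythons; '.toNat' is a totalising guard:
-- Pre_ excludes the negative shift counts on which Python's '1 << (x*m+y)' raises ValueError
def path_to_bitmask (path : List (Int × Int)) (n : Int) (m : Int) : Int :=
  path.foldl (fun bitmask xy => PySem.Int.bor bitmask ((1 : Int) <<< (xy.1 * m + xy.2).toNat)) 0

def get_bitmask_list_sorted (path_list : List (List (Int × Int))) (n : Int) (m : Int) : List Int × (List (Int × List (List (Int × Int)))) :=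
  let st := path_list.foldl
    (fun (st : PySem.Set Int × PySem.Dict Int (List (List (Int × Int)))) path =>
      let bitmask := path_to_bitmask path n m
      (PySem.Set.add st.1 bitmask, st.2.modify bitmask [] (fun l => l ++ [path])))
    (PySem.Set.empty, PySem.Dict.empty)
  (PySem.List.sorted st.1 (fun x => x) false, st.2.items)

-- ===== PORT B =====
def get_bitmask_list_sorted_alt (path_list : List (List (Int × Int))) (n : Int) (m : Int) : List Int × (List (Int × List (List (Int × Int)))) :=
  let masks := path_list.map (fun p => path_to_bitmask p n m)
  let order := PySem.List.dedup masks
  let grouping := order.map (fun k => (k, ((masks.zip path_list).filter (fun q => q.1 == k)).map (fun q => q.2)))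
  (PySem.List.sorted order (fun x => x) false, grouping)

-- ===== PRECONDITION & SPEC =====
-- Pre_ excludes exactly the inputs where some cell (x, y) has x*m + y < 0, on which Python A raises
-- ValueError ("negative shift count") in path_to_bitmask.
def Pre_get_bitmask_list_sorted (path_list : List (List (Int × Int))) (n : Int) (m : Int) : Prop :=
  ∀ path ∈ path_list, ∀ xy ∈ path, 0 ≤ xy.1 * m + xy.2
instance (path_list : List (List (Int × Int))) (n : Int) (m : Int) : Decidable (Pre_get_bitmask_list_sorted path_list n m) := by unfold Pre_get_bitmask_list_sorted; infer_instance
def pvWitness_get_bitmask_list_sorted : (List (List (Int × Int))) × Int × Int :=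
  ([[(0, 0), (0, 1)], [(1, 0)], [(0, 0), (0, 1)]], 2, 2)

def Spec_get_bitmask_list_sorted (path_list : List (List (Int × Int))) (n : Int) (m : Int) (out : List Int × (List (Int × List (List (Int × Int))))) : Prop := out = get_bitmask_list_sorted_alt path_list n m
instance (path_list : List (List (Int × Int))) (n : Int) (m : Int) (out : List Int × (List (Int × List (List (Int × Int))))) : Decidable (Spec_get_bitmask_list_sorted path_list n m out) := by unfold Spec_get_bitmask_list_sorted; infer_instance

-- ===== CLAIM (what is proved, stated in full; the proofs are below) =====
def Claim_equal_get_bitmask_list_sorted : Prop := ∀ (path_list : List (List (Int × Int))) (n : Int) (m : Int), Dom_get_bitmask_list_sorted path_list n m → Pre_get_bitmask_list_sorted path_list n m → Spec_get_bitmask_list_sorted path_list n m (get_bitmask_list_sorted path_list n m)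

-- ===== LEMMAS AND PROOFS =====

-- A's pair-state loop, split into its two independent components.
theorem pv_fold_split (path_list : List (List (Int × Int))) (n m : Int) :
    path_list.foldl
      (fun (st : PySem.Set Int × PySem.Dict Int (List (List (Int × Int)))) path =>
        (PySem.Set.add st.1 (path_to_bitmask path n m),
         st.2.modify (path_to_bitmask path n m) [] (fun l => l ++ [path])))
      (PySem.Set.empty, PySem.Dict.empty)
    = (path_list.foldl (fun s path => PySem.Set.add s (path_to_bitmask path n m)) PySem.Set.empty,
       path_list.foldl (fun d path => d.modify (path_to_bitmask path n m) [] (fun l => l ++ [path])) PySem.Dict.empty) :=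
  PySem.List.foldl_prod_mk (fun s path => PySem.Set.add s (path_to_bitmask path n m))
    (fun (d : PySem.Dict Int (List (List (Int × Int)))) path =>
      d.modify (path_to_bitmask path n m) [] (fun l => l ++ [path])) path_list PySem.Set.empty PySem.Dict.empty

-- the set of bitmasks A accumulates is set(masks)
theorem pv_set_component (path_list : List (List (Int × Int))) (n m : Int) :
    path_list.foldl (fun s path => PySem.Set.add s (path_to_bitmask path n m)) PySem.Set.empty
    = PySem.Set.ofList (path_list.map (fun p => path_to_bitmask p n m)) := by
  rw [PySem.Set.ofList_eq_foldl, List.foldl_map]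
  rfl

-- (masks.zip path_list) is the list of (key, path) pairs A's dict loop processes
theorem pv_zip_pairs (path_list : List (List (Int × Int))) (n m : Int) :
    (path_list.map (fun p => path_to_bitmask p n m)).zip path_list
    = path_list.map (fun p => (path_to_bitmask p n m, p)) := by
  simpa using (List.zip_map' (f := fun p => path_to_bitmask p n m) (g := id) (l := path_list))

-- A's defaultdict, rendered as items, is B's per-key gather over the first-seen key order
theorem pv_dict_component (path_list : List (List (Int × Int))) (n m : Int) :
    (path_list.foldl (fun d path => d.modify (path_to_bitmask path n m) [] (fun l => l ++ [path])) PySem.Dict.empty).items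
    = (PySem.List.dedup (path_list.map (fun p => path_to_bitmask p n m))).map
        (fun k => (k, (((path_list.map (fun p => path_to_bitmask p n m)).zip path_list).filter
                          (fun q => q.1 == k)).map (fun q => q.2))) := by
  set f := fun p => path_to_bitmask p n m with hf
  have hnd : (path_list.foldl (fun d path => d.modify (f path) [] (fun l => l ++ [path])) PySem.Dict.empty).keys.Nodup :=
    PySem.Dict.nodup_keys_foldl_modify_key path_list f [] (fun _ p _l => _l ++ [p]) PySem.Dict.empty
      (by simp)
  rw [PySem.Dict.items_eq_map_keys _ hnd ([] : List (List (Int × Int)))]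
  have hkeys : (path_list.foldl (fun d path => d.modify (f path) [] (fun l => l ++ [path])) PySem.Dict.empty).keys
      = PySem.Set.ofList (path_list.map f) := by
    rw [PySem.Dict.keys_foldl_modify_key path_list f [] (fun _ p _l => _l ++ [p]) PySem.Dict.empty]
    simp [PySem.Set.update, PySem.Set.ofList_eq_foldl, PySem.Dict.keys_empty]
  rw [hkeys, PySem.List.dedup_eq_ofList, pv_zip_pairs]
  apply List.map_congr_left
  intro k _
  have hfold : path_list.foldl (fun d path => d.modify (f path) [] (fun l => l ++ [path])) PySem.Dict.empty
      = (path_list.map (fun p => (f p, p))).foldl (fun d q => d.modify q.1 [] (fun l => l ++ [q.2])) PySem.Dict.empty := by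
    rw [List.foldl_map]
  rw [hfold, PySem.Dict.getD_foldl_modify_append]
  simp [hf]

-- ===== VERDICT (by name: the statement is the Claim_ definition above) =====
theorem get_bitmask_list_sorted_spec : Claim_equal_get_bitmask_list_sorted := by
  intro path_list n m _hdom _hpre
  show _ = _
  unfold get_bitmask_list_sorted get_bitmask_list_sorted_alt
  simp only [pv_fold_split, pv_set_component, pv_dict_component, PySem.List.dedup_eq_ofList]
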